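-- pv_equiv track=rewrite | github.com/maueroats/fifteen-ai | FifteenSolver.py | first_trace_info
-- ===== SOURCE A (Python) =====
-- from typing import List, Tuple, Dict
--
-- GameState = Tuple[List, int]
--
-- def first_trace_info(heap: List[Tuple[int, int, int, GameState]]):
--     seen = set()
--     vals = sorted(heap)
--     result = []
--     for heuristic, known, move, (state, pos) in vals:
--         if pos not in seen:
--             seen.add(pos)
--             result.append((pos, heuristic))
--     return result
-- ===== SOURCE B (Python) =====
-- def first_trace_info(heap):
--     # One pass: for each pos keep the lexicographically smallest full entry,
--     # then sort the survivors and project to (pos, heuristic).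
--     best = {}
--     for entry in heap:
--         pos = entry[3][1]
--         if pos not in best or entry < best[pos]:
--             best[pos] = entry
--     return [(e[3][1], e[0]) for e in sorted(best.values())]
-- ===== Notes on version B (the rewrite author's own statement) =====
-- stated objective: alternative
-- what changed: Replaces sort-then-dedup-by-pos with a single pass keeping the lexicographically minimal full entry per pos in a dict, then sorting only the per-pos survivors and projecting.
import Mathlib
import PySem

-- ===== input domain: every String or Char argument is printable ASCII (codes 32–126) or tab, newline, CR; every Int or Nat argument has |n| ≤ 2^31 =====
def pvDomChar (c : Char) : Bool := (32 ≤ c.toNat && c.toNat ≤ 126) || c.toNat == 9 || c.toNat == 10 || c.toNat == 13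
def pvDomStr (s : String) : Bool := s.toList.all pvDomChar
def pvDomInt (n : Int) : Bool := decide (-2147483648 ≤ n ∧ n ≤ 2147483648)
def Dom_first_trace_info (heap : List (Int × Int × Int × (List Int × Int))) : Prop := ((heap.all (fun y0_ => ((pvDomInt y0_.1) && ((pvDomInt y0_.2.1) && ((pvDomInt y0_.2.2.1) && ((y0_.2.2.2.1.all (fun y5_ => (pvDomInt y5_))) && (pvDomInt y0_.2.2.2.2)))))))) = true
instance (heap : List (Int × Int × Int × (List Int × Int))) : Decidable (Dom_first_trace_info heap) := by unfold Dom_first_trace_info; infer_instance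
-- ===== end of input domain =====

-- B replaces A's sort-then-dedup-by-pos with a one-pass per-pos minimum dict followed by a sort
-- of only the survivors (an alternative decomposition; same results, no speed claim).

-- Python's lexicographic comparison of the tuples (heuristic, known, move, (state, pos)):
-- encoded as a key into nested Prod.Lex (Mathlib's List order on `state` is code-point/lex, matching Python).
def ftiKey (x : Int × Int × Int × (List Int × Int)) : Int ×ₗ (Int ×ₗ (Int ×ₗ ((List Int) ×ₗ Int))) :=
  toLex (x.1, toLex (x.2.1, toLex (x.2.2.1, toLex (x.2.2.2.1, x.2.2.2.2))))

-- ===== PORT A =====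
def first_trace_info (heap : List (Int × Int × Int × (List Int × Int))) : List (Int × Int) :=
  let vals := PySem.List.sorted heap ftiKey
  let res := vals.foldl
    (fun (st : PySem.Set Int × List (Int × Int)) x =>
      if st.1.contains x.2.2.2.2 then st
      else (st.1.add x.2.2.2.2, st.2 ++ [(x.2.2.2.2, x.1)]))
    (PySem.Set.empty, [])
  res.2

-- ===== PORT B =====
-- one step of B's loop: keep the lexicographically smaller full entry for this pos
def ftiStep (d : PySem.Dict Int (Int × Int × Int × (List Int × Int)))
    (e : Int × Int × Int × (List Int × Int)) :
    PySem.Dict Int (Int × Int × Int × (List Int × Int)) :=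
  match d.get? e.2.2.2.2 with
  | none => d.insert e.2.2.2.2 e
  | some cur => if ftiKey e < ftiKey cur then d.insert e.2.2.2.2 e else d

def first_trace_info_alt (heap : List (Int × Int × Int × (List Int × Int))) : List (Int × Int) :=
  let best := heap.foldl ftiStep PySem.Dict.empty
  (PySem.List.sorted best.values ftiKey).map (fun e => (e.2.2.2.2, e.1))

-- ===== PRECONDITION & SPEC =====
def Spec_first_trace_info (heap : List (Int × Int × Int × (List Int × Int))) (out : List (Int × Int)) : Prop := out = first_trace_info_alt heap
instance (heap : List (Int × Int × Int × (List Int × Int))) (out : List (Int × Int)) : Decidable (Spec_first_trace_info heap out) := by unfold Spec_first_trace_info; infer_instance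

-- ===== CLAIM (what is proved, stated in full; the proofs are below) =====
def Claim_equal_first_trace_info : Prop := ∀ (heap : List (Int × Int × Int × (List Int × Int))), Dom_first_trace_info heap → Spec_first_trace_info heap (first_trace_info heap)

-- ===== LEMMAS AND PROOFS =====

abbrev FT : Type := Int × Int × Int × (List Int × Int)

def fpos (x : FT) : Int := x.2.2.2.2

theorem ftiKey_inj (a b : FT) (h : ftiKey a = ftiKey b) : a = b := by
  obtain ⟨a1, a2, a3, s, p⟩ := a
  obtain ⟨b1, b2, b3, t, q⟩ := b
  simp only [ftiKey, toLex_inj, Prod.mk.injEq] at h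
  simp_all

theorem fpos_eq_of_key {a b : FT} (h : ftiKey a = ftiKey b) : fpos a = fpos b := by
  cases ftiKey_inj a b h; rfl

theorem key_lt_of_le_of_pos_ne {a b : FT} (hle : ftiKey a ≤ ftiKey b) (hne : fpos a ≠ fpos b) :
    ftiKey a < ftiKey b :=
  lt_of_le_of_ne hle (fun he => hne (fpos_eq_of_key he))

-- first-occurrence-by-pos filter (pure form of A's seen/result loop)
def keepFirst (seen : PySem.Set Int) : List FT → List FT
  | [] => []
  | x :: xs =>
    if PySem.Set.contains seen (fpos x) then keepFirst seen xs
    else x :: keepFirst (PySem.Set.add seen (fpos x)) xs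

theorem foldA (l : List FT) : ∀ (seen : PySem.Set Int) (res : List (Int × Int)),
    (l.foldl
      (fun (st : PySem.Set Int × List (Int × Int)) x =>
        if st.1.contains x.2.2.2.2 then st
        else (st.1.add x.2.2.2.2, st.2 ++ [(x.2.2.2.2, x.1)]))
      (seen, res)).2
    = res ++ (keepFirst seen l).map (fun e => (fpos e, e.1)) := by
  induction l with
  | nil => intro seen res; simp [keepFirst]
  | cons x xs ih =>
    intro seen res
    simp only [List.foldl_cons, keepFirst, fpos]
    split_ifs with hc
    · exact ih _ _
    · rw [ih]; simp [fpos]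

theorem keepFirst_subset {seen : PySem.Set Int} {l : List FT} {m : FT}
    (h : m ∈ keepFirst seen l) : m ∈ l := by
  induction l generalizing seen with
  | nil => simp [keepFirst] at h
  | cons x xs ih =>
    simp only [keepFirst] at h
    split_ifs at h with hc
    · exact List.mem_cons_of_mem _ (ih h)
    · rcases List.mem_cons.mp h with h' | h'
      · simp [h']
      · exact List.mem_cons_of_mem _ (ih h')

theorem keepFirst_pos_not_seen {seen : PySem.Set Int} {l : List FT} {m : FT}
    (h : m ∈ keepFirst seen l) : fpos m ∉ seen := by
  induction l generalizing seen with
  | nil => simp [keepFirst] at h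
  | cons x xs ih =>
    simp only [keepFirst] at h
    split_ifs at h with hc
    · exact ih h
    · rcases List.mem_cons.mp h with h' | h'
      · subst h'
        simpa [PySem.Set.contains] using hc
      · intro hm
        exact ih h' ((PySem.Set.mem_add seen (fpos x) (fpos m)).mpr (Or.inl hm))

theorem keepFirst_mem_posmap {seen : PySem.Set Int} {l : List FT} {p : Int} :
    p ∈ (keepFirst seen l).map fpos ↔ (p ∈ l.map fpos ∧ p ∉ seen) := by
  induction l generalizing seen with
  | nil => simp [keepFirst]
  | cons x xs ih =>
    simp only [keepFirst]
    split_ifs with hc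
    · rw [ih]
      have hx : fpos x ∈ seen := by simpa [PySem.Set.contains] using hc
      simp only [List.map_cons, List.mem_cons]
      constructor
      · rintro ⟨hm, hs⟩; exact ⟨Or.inr hm, hs⟩
      · rintro ⟨hm | hm, hs⟩
        · exact absurd (hm ▸ hx) hs
        · exact ⟨hm, hs⟩
    · have hx : fpos x ∉ seen := by simpa [PySem.Set.contains] using hc
      simp only [List.map_cons, List.mem_cons, ih, PySem.Set.mem_add]
      constructor
      · rintro (h | ⟨hm, hs⟩)
        · exact ⟨Or.inl h, h ▸ hx⟩
        · exact ⟨Or.inr hm, fun hse => hs (Or.inl hse)⟩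
      · rintro ⟨hm | hm, hs⟩
        · exact Or.inl hm
        · by_cases he : p = fpos x
          · exact Or.inl he
          · exact Or.inr ⟨hm, by rintro (h1 | h2) <;> [exact hs h1; exact he h2]⟩

theorem keepFirst_nodup (seen : PySem.Set Int) (l : List FT) :
    ((keepFirst seen l).map fpos).Nodup := by
  induction l generalizing seen with
  | nil => simp [keepFirst]
  | cons x xs ih =>
    simp only [keepFirst]
    split_ifs with hc
    · exact ih _
    · simp only [List.map_cons, List.nodup_cons]
      refine ⟨fun hmem => ?_, ih _⟩
      rcases List.mem_map.mp hmem with ⟨m, hm, hpm⟩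
      have := keepFirst_pos_not_seen hm
      exact this (hpm ▸ (PySem.Set.mem_add seen (fpos x) (fpos x)).mpr (Or.inr rfl))

theorem keepFirst_min {seen : PySem.Set Int} {l : List FT}
    (hp : l.Pairwise (fun a b => ftiKey a ≤ ftiKey b)) :
    ∀ m ∈ keepFirst seen l, ∀ x ∈ l, fpos x = fpos m → ftiKey m ≤ ftiKey x := by
  induction l generalizing seen with
  | nil => simp [keepFirst]
  | cons x xs ih =>
    rcases List.pairwise_cons.mp hp with ⟨hx, hxs⟩
    intro m hm y hy hpy
    simp only [keepFirst] at hm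
    split_ifs at hm with hc
    · have hcx : fpos x ∈ seen := by simpa [PySem.Set.contains] using hc
      have hmn := keepFirst_pos_not_seen hm
      rcases List.mem_cons.mp hy with h' | h'
      · exact absurd (hpy ▸ (h' ▸ hcx)) hmn
      · exact ih hxs m hm y h' hpy
    · rcases List.mem_cons.mp hm with hm' | hm'
      · subst hm'
        rcases List.mem_cons.mp hy with h' | h'
        · exact le_of_eq (congrArg ftiKey h'.symm)
        · exact hx y h' 
      · have hmn := keepFirst_pos_not_seen hm'
        have hmx : fpos m ≠ fpos x := fun he =>
          hmn (he ▸ (PySem.Set.mem_add seen (fpos x) (fpos x)).mpr (Or.inr rfl))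
        rcases List.mem_cons.mp hy with h' | h'
        · exact absurd (hpy ▸ congrArg fpos h'.symm) hmx.symm
        · exact ih hxs m hm' y h' hpy

theorem keepFirst_pairwise {seen : PySem.Set Int} {l : List FT}
    (hp : l.Pairwise (fun a b => ftiKey a ≤ ftiKey b)) :
    (keepFirst seen l).Pairwise (fun a b => ftiKey a < ftiKey b) := by
  induction l generalizing seen with
  | nil => simp [keepFirst]
  | cons x xs ih =>
    rcases List.pairwise_cons.mp hp with ⟨hx, hxs⟩
    simp only [keepFirst]
    split_ifs with hc
    · exact ih hxs
    · refine List.pairwise_cons.mpr ⟨fun b hb => ?_, ih hxs⟩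
      have hble := hx b (keepFirst_subset hb)
      have hbp := keepFirst_pos_not_seen hb
      have hne : fpos x ≠ fpos b := fun he =>
        hbp (he ▸ (PySem.Set.mem_add seen (fpos x) (fpos x)).mpr (Or.inr rfl))
      exact key_lt_of_le_of_pos_ne hble hne

theorem foldB_nodup (l : List FT) : ∀ (d : PySem.Dict Int FT), d.keys.Nodup →
    (l.foldl ftiStep d).keys.Nodup := by
  induction l with
  | nil => intro d hd; simpa using hd
  | cons x xs ih =>
    intro d hd
    simp only [List.foldl_cons]
    apply ih
    unfold ftiStep
    rcases hg : d.get? x.2.2.2.2 with _ | cur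
    · exact PySem.Dict.nodup_keys_insert d _ x hd
    · dsimp only
      split_ifs with hlt
      · exact PySem.Dict.nodup_keys_insert d _ x hd
      · exact hd

theorem foldB_keys (l : List FT) : ∀ (d : PySem.Dict Int FT) (k : Int),
    k ∈ (l.foldl ftiStep d).keys ↔ k ∈ d.keys ∨ k ∈ l.map fpos := by
  induction l with
  | nil => simp
  | cons x xs ih =>
    intro d k
    simp only [List.foldl_cons, ih, List.map_cons, List.mem_cons]
    unfold ftiStep
    rcases hg : d.get? x.2.2.2.2 with _ | cur
    · rw [PySem.Dict.mem_keys_insert]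
      simp only [fpos]
      tauto
    · have hk : x.2.2.2.2 ∈ d.keys := by
        by_contra hnk
        rw [← PySem.Dict.get?_eq_none_iff_not_mem_keys] at hnk
        simp [hnk] at hg
      dsimp only
      split_ifs with hlt
      · rw [PySem.Dict.mem_keys_insert]
        simp only [fpos]
        tauto
      · simp only [fpos]
        constructor
        · tauto
        · rintro (h | h | h) <;> [tauto; exact Or.inl (h ▸ hk); tauto]

theorem foldB_inv (l : List FT) : ∀ (d : PySem.Dict Int FT),
    (∀ k w, d.get? k = some w → fpos w = k) →
    ∀ k v, (l.foldl ftiStep d).get? k = some v →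
      fpos v = k ∧ (v ∈ l ∨ d.get? k = some v) ∧
      (∀ x ∈ l, fpos x = k → ftiKey v ≤ ftiKey x) ∧
      (∀ w, d.get? k = some w → ftiKey v ≤ ftiKey w) := by
  induction l with
  | nil =>
    intro d hd k v h
    simp only [List.foldl_nil] at h
    refine ⟨hd k v h, Or.inr h, by simp, fun w hw => ?_⟩
    rw [h] at hw
    cases hw
    exact le_refl _
  | cons x xs ih =>
    intro d hd k v h
    simp only [List.foldl_cons] at h
    rcases hg : d.get? x.2.2.2.2 with _ | cur
    · -- pos x not yet in dict: step inserts x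
      have hstep : ftiStep d x = d.insert x.2.2.2.2 x := by unfold ftiStep; rw [hg]
      rw [hstep] at h
      have hd' : ∀ k' w, (d.insert x.2.2.2.2 x).get? k' = some w → fpos w = k' := by
        intro k' w hw
        rw [PySem.Dict.get?_insert] at hw
        split_ifs at hw with he
        · cases hw; exact he ▸ rfl
        · exact hd _ _ hw
      obtain ⟨h1, h2, h3, h4⟩ := ih _ hd' k v h
      refine ⟨h1, ?_, ?_, ?_⟩
      · rcases h2 with h2 | h2
        · exact Or.inl (List.mem_cons_of_mem _ h2)
        · rw [PySem.Dict.get?_insert] at h2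
          split_ifs at h2 with he
          · cases h2; exact Or.inl (List.mem_cons_self ..)
          · exact Or.inr h2
      · intro y hy hpy
        rcases List.mem_cons.mp hy with rfl | hy'
        · exact h4 y (by rw [PySem.Dict.get?_insert]; simp [← hpy, fpos])
        · exact h3 y hy' hpy
      · intro w hw
        by_cases he : k = x.2.2.2.2
        · rw [he, hg] at hw; cases hw
        · exact h4 w (by rw [PySem.Dict.get?_insert]; simp [he, hw])
    · by_cases hlt : ftiKey x < ftiKey cur
      · -- new entry is strictly smaller: step overwrites
        have hstep : ftiStep d x = d.insert x.2.2.2.2 x := by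
          unfold ftiStep; rw [hg]; simp [hlt]
        rw [hstep] at h
        have hd' : ∀ k' w, (d.insert x.2.2.2.2 x).get? k' = some w → fpos w = k' := by
          intro k' w hw
          rw [PySem.Dict.get?_insert] at hw
          split_ifs at hw with he
          · cases hw; exact he ▸ rfl
          · exact hd _ _ hw
        obtain ⟨h1, h2, h3, h4⟩ := ih _ hd' k v h
        refine ⟨h1, ?_, ?_, ?_⟩
        · rcases h2 with h2 | h2
          · exact Or.inl (List.mem_cons_of_mem _ h2)
          · rw [PySem.Dict.get?_insert] at h2
            split_ifs at h2 with he
            · cases h2; exact Or.inl (List.mem_cons_self ..)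
            · exact Or.inr h2
        · intro y hy hpy
          rcases List.mem_cons.mp hy with rfl | hy'
          · exact h4 y (by rw [PySem.Dict.get?_insert]; simp [← hpy, fpos])
          · exact h3 y hy' hpy
        · intro w hw
          by_cases he : k = x.2.2.2.2
          · have hvx : ftiKey v ≤ ftiKey x :=
              h4 x (by rw [PySem.Dict.get?_insert]; simp [he])
            rw [he, hg] at hw
            cases hw
            exact hvx.trans hlt.le
          · exact h4 w (by rw [PySem.Dict.get?_insert]; simp [he, hw])
      · -- existing entry is not larger: step keeps the dict
        have hstep : ftiStep d x = d := by
          unfold ftiStep; rw [hg]; simp [hlt]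
        rw [hstep] at h
        obtain ⟨h1, h2, h3, h4⟩ := ih _ hd k v h
        refine ⟨h1, ?_, ?_, h4⟩
        · rcases h2 with h2 | h2
          · exact Or.inl (List.mem_cons_of_mem _ h2)
          · exact Or.inr h2
        · intro y hy hpy
          rcases List.mem_cons.mp hy with rfl | hy'
          · have hvc : ftiKey v ≤ ftiKey cur := h4 cur (by rw [← hpy]; exact hg)
            exact hvc.trans (not_lt.mp hlt)
          · exact h3 y hy' hpy

-- ===== VERDICT (by name: the statement is the Claim_ definition above) =====
theorem first_trace_info_spec : Claim_equal_first_trace_info := by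
  intro heap _hdom
  show first_trace_info heap = first_trace_info_alt heap
  have hA := foldA (PySem.List.sorted heap ftiKey) PySem.Set.empty []
  rw [List.nil_append] at hA
  have hsortpair := PySem.List.sorted_pairwise heap ftiKey
  have hdnodup : (heap.foldl ftiStep PySem.Dict.empty).keys.Nodup :=
    foldB_nodup heap _ (PySem.Dict.nodup_keys_empty)
  have hdpos : ∀ k v, (heap.foldl ftiStep PySem.Dict.empty).get? k = some v →
      fpos v = k ∧ v ∈ heap ∧ (∀ x ∈ heap, fpos x = k → ftiKey v ≤ ftiKey x) := by
    intro k v h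
    obtain ⟨h1, h2, h3, _⟩ := foldB_inv heap PySem.Dict.empty
      (by intro k' w hw; rw [PySem.Dict.get?_empty] at hw; cases hw) k v h
    refine ⟨h1, ?_, h3⟩
    rcases h2 with h2 | h2
    · exact h2
    · rw [PySem.Dict.get?_empty] at h2; cases h2
  have hmemL2 : ∀ v, v ∈ (heap.foldl ftiStep PySem.Dict.empty).values ↔
      ∃ k, (heap.foldl ftiStep PySem.Dict.empty).get? k = some v := by
    intro v
    constructor
    · intro hv
      simp only [PySem.Dict.values] at hv
      rcases List.mem_map.mp hv with ⟨p, hp, hpv⟩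
      refine ⟨p.1, ?_⟩
      rw [PySem.Dict.get?_eq_some_iff_mem_items _ _ _ hdnodup, ← hpv]
      simpa using hp
    · rintro ⟨k, hk⟩
      have := (PySem.Dict.get?_eq_some_iff_mem_items _ _ _ hdnodup).mp hk
      simp only [PySem.Dict.values]
      exact List.mem_map.mpr ⟨(k, v), this, rfl⟩
  have hposA : ∀ p, p ∈ (keepFirst PySem.Set.empty (PySem.List.sorted heap ftiKey)).map fpos ↔
      ∃ x ∈ heap, fpos x = p := by
    intro p
    rw [keepFirst_mem_posmap]
    simp only [PySem.Set.empty, List.not_mem_nil, not_false_iff, and_true]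
    constructor
    · intro hp
      rcases List.mem_map.mp hp with ⟨x, hx, hxp⟩
      exact ⟨x, (PySem.List.mem_sorted heap ftiKey false x).mp hx, hxp⟩
    · rintro ⟨x, hx, hxp⟩
      exact List.mem_map.mpr ⟨x, (PySem.List.mem_sorted heap ftiKey false x).mpr hx, hxp⟩
  have hL1min : ∀ m ∈ keepFirst PySem.Set.empty (PySem.List.sorted heap ftiKey),
      ∀ x ∈ heap, fpos x = fpos m → ftiKey m ≤ ftiKey x := by
    intro m hm x hx hpx
    exact keepFirst_min hsortpair m hm x ((PySem.List.mem_sorted heap ftiKey false x).mpr hx) hpx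
  have hL1memheap : ∀ m ∈ keepFirst PySem.Set.empty (PySem.List.sorted heap ftiKey), m ∈ heap :=
    fun m hm => (PySem.List.mem_sorted heap ftiKey false m).mp (keepFirst_subset hm)
  have hL2keys : ((heap.foldl ftiStep PySem.Dict.empty).values).map fpos
      = (heap.foldl ftiStep PySem.Dict.empty).keys := by
    simp only [PySem.Dict.values, PySem.Dict.keys, List.map_map]
    apply List.map_congr_left
    intro p hp
    have hg := (PySem.Dict.get?_eq_some_iff_mem_items _ p.1 p.2 hdnodup).mpr (by simpa using hp)
    exact (hdpos _ _ hg).1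
  have hmemiff : ∀ m, m ∈ keepFirst PySem.Set.empty (PySem.List.sorted heap ftiKey) ↔
      m ∈ (heap.foldl ftiStep PySem.Dict.empty).values := by
    intro m
    constructor
    · intro hm
      have hkmem : fpos m ∈ (heap.foldl ftiStep PySem.Dict.empty).keys := by
        rw [foldB_keys heap PySem.Dict.empty (fpos m)]
        exact Or.inr (List.mem_map_of_mem (hL1memheap m hm))
      rcases hg : (heap.foldl ftiStep PySem.Dict.empty).get? (fpos m) with _ | w
      · exact absurd ((PySem.Dict.get?_eq_none_iff_not_mem_keys _ _).mp hg) (not_not_intro hkmem)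
      · obtain ⟨h1, h2, h3⟩ := hdpos _ _ hg
        have hwle : ftiKey w ≤ ftiKey m := h3 m (hL1memheap m hm) rfl
        have hmle : ftiKey m ≤ ftiKey w := hL1min m hm w h2 h1
        have hwm : w = m := ftiKey_inj _ _ (le_antisymm hwle hmle)
        exact (hmemL2 m).mpr ⟨fpos m, hwm ▸ hg⟩
    · intro hm
      obtain ⟨k, hk⟩ := (hmemL2 m).mp hm
      obtain ⟨h1, h2, h3⟩ := hdpos _ _ hk
      have hp : fpos m ∈ (keepFirst PySem.Set.empty (PySem.List.sorted heap ftiKey)).map fpos :=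
        (hposA _).mpr ⟨m, h2, rfl⟩
      rcases List.mem_map.mp hp with ⟨m', hm', hpm'⟩
      have ha : ftiKey m' ≤ ftiKey m := hL1min m' hm' m h2 hpm'.symm
      have hb : ftiKey m ≤ ftiKey m' := h3 m' (hL1memheap m' hm') (by rw [hpm', h1])
      exact (ftiKey_inj _ _ (le_antisymm ha hb)) ▸ hm'
  have hperm : (keepFirst PySem.Set.empty (PySem.List.sorted heap ftiKey)).Perm
      (heap.foldl ftiStep PySem.Dict.empty).values :=
    (List.perm_ext_iff_of_nodup (List.Nodup.of_map fpos (keepFirst_nodup _ _))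
      (List.Nodup.of_map fpos (hL2keys ▸ hdnodup))).mpr hmemiff
  have hsorted : PySem.List.sorted (heap.foldl ftiStep PySem.Dict.empty).values ftiKey
      = keepFirst PySem.Set.empty (PySem.List.sorted heap ftiKey) :=
    PySem.List.sorted_eq_of_perm_of_pairwise_lt _ _ ftiKey hperm (keepFirst_pairwise hsortpair)
  have hB : first_trace_info_alt heap
      = (keepFirst PySem.Set.empty (PySem.List.sorted heap ftiKey)).map (fun e => (fpos e, e.1)) := by
    show (PySem.List.sorted (heap.foldl ftiStep PySem.Dict.empty).values ftiKey).map
        (fun e => (e.2.2.2.2, e.1)) = _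
    rw [hsorted]
    rfl
  exact hA.trans hB.symm
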